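-- pv_equiv track=rewrite | github.com/itmozahidul/Githubwork | 8_queen_board_ Game_test/__init__.py | checkcoloumattack
-- ===== SOURCE A (Python) =====
-- def checkcoloumattack(board):
--     attack = 0
--     for i in range(len(board)):
--         col=[]
--         for j in range(len(board)):
--
--             queen=board[j][i]
--             col.append(queen)
--
--
--         if col.count(1) > 1:
--             attack = attack + (col.count(1) - 1)
--     return attack
-- ===== SOURCE B (Python) =====
-- def checkcoloumattack(board):
--     n = len(board)
--     total = 0
--     cols = set()
--     for i in range(n):
--         for j in range(n):
--             if board[j][i] == 1:
--                 total += 1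
--                 cols.add(i)
--     return total - len(cols)
-- ===== Notes on version B (the rewrite author's own statement) =====
-- stated objective: simpler
-- what changed: Replaces the per-column list building and double count(1) scan with two running accumulators (total number of 1-cells and the set of columns containing a 1), returning total - len(cols) by the identity sum_col max(c-1,0) = total - #nonempty columns.
import Mathlib
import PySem

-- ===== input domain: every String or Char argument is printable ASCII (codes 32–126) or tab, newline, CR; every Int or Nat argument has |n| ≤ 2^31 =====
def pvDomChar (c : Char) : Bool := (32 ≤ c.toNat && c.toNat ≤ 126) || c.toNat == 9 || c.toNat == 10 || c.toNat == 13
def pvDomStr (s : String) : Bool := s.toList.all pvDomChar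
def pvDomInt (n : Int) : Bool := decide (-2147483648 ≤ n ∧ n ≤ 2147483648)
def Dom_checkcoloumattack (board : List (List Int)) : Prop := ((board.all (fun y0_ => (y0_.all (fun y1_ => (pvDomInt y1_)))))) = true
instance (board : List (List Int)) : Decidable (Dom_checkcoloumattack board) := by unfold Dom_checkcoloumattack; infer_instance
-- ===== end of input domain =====

-- B replaces A's per-column list building and double count(1) scan with two running
-- accumulators (total number of 1-cells, set of columns containing a 1) and a closed-form
-- subtraction; objective: simpler.

-- ===== PORT A =====
def checkcoloumattack (board : List (List Int)) : Int :=
  (PySem.List.pyRange 0 board.length 1).foldl (fun attack i =>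
    let col := (PySem.List.pyRange 0 board.length 1).foldl (fun col j =>
      let queen := PySem.List.pyGetD (PySem.List.pyGetD board j []) i 0
      col ++ [queen]) ([] : List Int)
    if (col.count 1 : Int) > 1 then attack + ((col.count 1 : Int) - 1) else attack) 0

-- ===== PORT B =====
def checkcoloumattack_alt (board : List (List Int)) : Int :=
  let n : Int := board.length
  let st := (PySem.List.pyRange 0 n 1).foldl (fun (st : Int × PySem.Set Int) i =>
    (PySem.List.pyRange 0 n 1).foldl (fun st j =>
      if PySem.List.pyGetD (PySem.List.pyGetD board j []) i 0 = 1
      then (st.1 + 1, st.2.add i) else st) st) (0, PySem.Set.empty)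
  st.1 - PySem.Set.len st.2

-- ===== PRECONDITION & SPEC =====
-- Pre_ excludes ragged boards (a row shorter than the number of rows), on which the Python A
-- raises IndexError at board[j][i].
def Pre_checkcoloumattack (board : List (List Int)) : Prop :=
  ∀ row ∈ board, board.length ≤ row.length
instance (board : List (List Int)) : Decidable (Pre_checkcoloumattack board) := by
  unfold Pre_checkcoloumattack; infer_instance
def pvWitness_checkcoloumattack : List (List Int) := [[1, 0], [1, 0]]
def Spec_checkcoloumattack (board : List (List Int)) (out : Int) : Prop := out = checkcoloumattack_alt board
instance (board : List (List Int)) (out : Int) : Decidable (Spec_checkcoloumattack board out) := by unfold Spec_checkcoloumattack; infer_instance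

-- ===== CLAIM (what is proved, stated in full; the proofs are below) =====
def Claim_equal_checkcoloumattack : Prop := ∀ (board : List (List Int)), Dom_checkcoloumattack board → Pre_checkcoloumattack board → Spec_checkcoloumattack board (checkcoloumattack board)

-- ===== LEMMAS AND PROOFS =====

-- the cell access both ports share
def pvGet (board : List (List Int)) (j i : Int) : Int :=
  PySem.List.pyGetD (PySem.List.pyGetD board j []) i 0

-- the count of 1s in column i
def pvC (board : List (List Int)) (i : Int) : Nat :=
  ((PySem.List.pyRange 0 board.length 1).map (fun j => pvGet board j i)).count 1

-- abstract per-column steps of the two outer loops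
def pvStepA (board : List (List Int)) (attack i : Int) : Int :=
  if ((pvC board i : Int)) > 1 then attack + ((pvC board i : Int) - 1) else attack
def pvStepB (board : List (List Int)) (st : Int × PySem.Set Int) (i : Int) : Int × PySem.Set Int :=
  (st.1 + (pvC board i : Int), if pvC board i = 0 then st.2 else st.2.add i)

theorem pv_mem_add (s : PySem.Set Int) (i : Int) : i ∈ s.add i := by
  by_cases h : i ∈ s <;> simp [PySem.Set.add, PySem.Set.contains, h]

theorem pv_add_idem (s : PySem.Set Int) (i : Int) : (s.add i).add i = s.add i := by
  have h := pv_mem_add s i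
  by_cases h' : i ∈ s <;> simp [PySem.Set.add, PySem.Set.contains, h']

-- the combined inner loop of B over a prefix of the rows, in closed form
theorem pv_foldl_column (board : List (List Int)) (i : Int) (L : List Int) (st : Int × PySem.Set Int) :
    L.foldl (fun (st : Int × PySem.Set Int) j =>
      if PySem.List.pyGetD (PySem.List.pyGetD board j []) i 0 = 1
      then (st.1 + 1, st.2.add i) else st) st
    = (st.1 + ((L.map (fun j => pvGet board j i)).count 1 : Int),
       if (L.map (fun j => pvGet board j i)).count 1 = 0 then st.2 else st.2.add i) := by
  induction L generalizing st with
  | nil => simp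
  | cons j L ih =>
    simp only [List.foldl_cons, List.map_cons]
    by_cases h : pvGet board j i = 1
    · rw [if_pos (by simpa [pvGet] using h), ih, pv_add_idem]
      simp [h]
      ring
    · rw [if_neg (by simpa [pvGet] using h), ih]
      simp [h]

-- A's outer step equals pvStepA
theorem pv_stepA_eq (board : List (List Int)) :
    (fun attack i =>
      let col := (PySem.List.pyRange 0 board.length 1).foldl (fun col j =>
        let queen := PySem.List.pyGetD (PySem.List.pyGetD board j []) i 0
        col ++ [queen]) ([] : List Int)
      if (col.count 1 : Int) > 1 then attack + ((col.count 1 : Int) - 1) else attack)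
    = pvStepA board := by
  funext attack i
  simp only [PySem.List.foldl_append_singleton_eq_map, List.nil_append]
  simp only [pvStepA, pvC, pvGet]

-- B's outer step equals pvStepB
theorem pv_stepB_eq (board : List (List Int)) :
    (fun (st : Int × PySem.Set Int) i =>
      (PySem.List.pyRange 0 (board.length : Int) 1).foldl (fun st j =>
        if PySem.List.pyGetD (PySem.List.pyGetD board j []) i 0 = 1
        then (st.1 + 1, st.2.add i) else st) st)
    = pvStepB board := by
  funext st i
  rw [pv_foldl_column]
  rfl

-- main invariant: over range(m) both outer folds are related
theorem pv_main (board : List (List Int)) (m : Nat) :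
    ((PySem.List.pyRange 0 (m : Int) 1).foldl (pvStepA board) 0
      = ((PySem.List.pyRange 0 (m : Int) 1).foldl (pvStepB board) (0, PySem.Set.empty)).1
        - (((PySem.List.pyRange 0 (m : Int) 1).foldl (pvStepB board) (0, PySem.Set.empty)).2.length : Int))
    ∧ ∀ x ∈ ((PySem.List.pyRange 0 (m : Int) 1).foldl (pvStepB board) (0, PySem.Set.empty)).2,
        0 ≤ x ∧ x < (m : Int) := by
  induction m with
  | zero =>
    rw [PySem.List.pyRange_one_eq_nil (by norm_num)]
    exact ⟨by simp [PySem.Set.empty], by intro x hx; exact absurd hx (by simp [PySem.Set.empty])⟩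
  | succ m ih =>
    obtain ⟨ih1, ih2⟩ := ih
    have hcast : ((m + 1 : Nat) : Int) = (m : Int) + 1 := by push_cast; ring
    rw [hcast, PySem.List.pyRange_one_succ_right (by positivity)]
    simp only [List.foldl_append, List.foldl_cons, List.foldl_nil]
    set st := (PySem.List.pyRange 0 (m : Int) 1).foldl (pvStepB board) (0, PySem.Set.empty) with hst
    have hmem : (m : Int) ∉ st.2 := by
      intro hx
      have := ih2 _ hx
      omega
    constructor
    · by_cases hc : pvC board (m : Int) = 0
      · simp [pvStepA, pvStepB, hc, ih1]
      · have hlen : (st.2.add (m : Int)).length = st.2.length + 1 := by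
          simp [PySem.Set.add, PySem.Set.contains, hmem]
        by_cases hc1 : pvC board (m : Int) > 1
        · have : ((pvC board (m : Int) : Int)) > 1 := by exact_mod_cast hc1
          simp only [pvStepA, pvStepB, if_pos this, if_neg hc, hlen]
          push_cast
          omega
        · have h1 : pvC board (m : Int) = 1 := by omega
          have : ¬ ((pvC board (m : Int) : Int)) > 1 := by simp [h1]
          simp only [pvStepA, pvStepB, h1]
          simp [hlen]
          exact ih1
    · intro x hx
      by_cases hc : pvC board (m : Int) = 0
      · simp only [pvStepB, if_pos hc] at hx
        have := ih2 _ hx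
        exact ⟨this.1, by omega⟩
      · simp only [pvStepB, if_neg hc] at hx
        rcases (PySem.Set.mem_add _ _ _).mp hx with h | h
        · have := ih2 _ h
          exact ⟨this.1, by omega⟩
        · subst h
          exact ⟨by positivity, by omega⟩

-- ===== VERDICT (by name: the statement is the Claim_ definition above) =====
theorem checkcoloumattack_spec : Claim_equal_checkcoloumattack := by
  intro board _ _
  unfold Spec_checkcoloumattack checkcoloumattack checkcoloumattack_alt
  dsimp only
  rw [pv_stepA_eq, pv_stepB_eq]
  exact (pv_main board board.length).1
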